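-- pv_equiv track=rewrite | github.com/mattkram/advent-of-code | y2021/day02/part1.py | calculate
-- ===== SOURCE A (Python) =====
-- from typing import List
-- from typing import Tuple
--
-- ParsedInput = List[Tuple[str, int]]
--
-- def calculate(data: ParsedInput) -> int:
--     x, z = 0, 0
--     for direction, value in data:
--         if direction == "forward":
--             x += value
--         elif direction == "down":
--             z += value
--         elif direction == "up":
--             z -= value
--         else:
--             raise ValueError
--     return x * z
-- ===== SOURCE B (Python) =====
-- def calculate(data):
--     if any(d not in ("forward", "down", "up") for d, _ in data):
--         raise ValueError
--     x = sum(v for d, v in data if d == "forward")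
--     z = sum(v for d, v in data if d == "down") - sum(v for d, v in data if d == "up")
--     return x * z
-- ===== Notes on version B (the rewrite author's own statement) =====
-- stated objective: simpler
-- what changed: Replaces A's single interleaved loop with running (x,z) state by a membership validation check plus three independent category-filtered sums combined in one closed expression.
import Mathlib
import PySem

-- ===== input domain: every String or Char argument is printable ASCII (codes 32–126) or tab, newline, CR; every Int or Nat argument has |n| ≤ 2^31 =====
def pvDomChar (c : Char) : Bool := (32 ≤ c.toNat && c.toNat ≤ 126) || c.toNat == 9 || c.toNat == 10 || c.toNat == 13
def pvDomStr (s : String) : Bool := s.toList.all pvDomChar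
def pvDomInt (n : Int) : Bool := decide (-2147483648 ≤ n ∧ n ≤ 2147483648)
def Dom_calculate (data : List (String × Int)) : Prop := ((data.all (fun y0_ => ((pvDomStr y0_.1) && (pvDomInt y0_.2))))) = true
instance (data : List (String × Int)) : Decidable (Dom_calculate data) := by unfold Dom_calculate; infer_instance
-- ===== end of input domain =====

-- B replaces A's single interleaved (x,z)-state loop by three independent category-filtered sums (objective: simpler).

-- ===== PORT A =====
-- A's loop over data with state (x, z); the final else raises ValueError (excluded by Pre_),
-- where the port leaves the state unchanged.
def calcLoop : List (String × Int) → Int × Int → Int × Int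
  | [], s => s
  | (d, v) :: rest, (x, z) =>
    if d == "forward" then calcLoop rest (x + v, z)
    else if d == "down" then calcLoop rest (x, z + v)
    else if d == "up" then calcLoop rest (x, z - v)
    else calcLoop rest (x, z)  -- Python: raise ValueError (outside Pre_calculate)

def calculate (data : List (String × Int)) : Int :=
  let s := calcLoop data (0, 0)
  s.1 * s.2

-- ===== PORT B =====
def calculate_alt (data : List (String × Int)) : Int :=
  if data.any (fun p => !(p.1 == "forward" || p.1 == "down" || p.1 == "up")) then
    0  -- Python: raise ValueError (outside Pre_calculate)
  else
  let x := ((data.filter (fun p => p.1 == "forward")).map Prod.snd).sum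
  let z := ((data.filter (fun p => p.1 == "down")).map Prod.snd).sum
           - ((data.filter (fun p => p.1 == "up")).map Prod.snd).sum
  x * z

-- ===== PRECONDITION & SPEC =====
-- Pre_ excludes exactly the inputs containing a direction outside {"forward","down","up"},
-- on which A raises ValueError.
def Pre_calculate (data : List (String × Int)) : Prop :=
  ∀ p ∈ data, p.1 = "forward" ∨ p.1 = "down" ∨ p.1 = "up"
instance (data : List (String × Int)) : Decidable (Pre_calculate data) := by
  unfold Pre_calculate; infer_instance

def pvWitness_calculate : (List (String × Int)) := [("forward", 3), ("down", 5), ("up", 2), ("forward", 1)]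

def Spec_calculate (data : List (String × Int)) (out : Int) : Prop := out = calculate_alt data
instance (data : List (String × Int)) (out : Int) : Decidable (Spec_calculate data out) := by
  unfold Spec_calculate; infer_instance

-- ===== CLAIM (what is proved, stated in full; the proofs are below) =====
def Claim_equal_calculate : Prop := ∀ (data : List (String × Int)), Dom_calculate data → Pre_calculate data → Spec_calculate data (calculate data)

-- ===== LEMMAS AND PROOFS =====

def fsum (d : String) (data : List (String × Int)) : Int :=
  ((data.filter (fun p => p.1 == d)).map Prod.snd).sum

lemma calcLoop_char (data : List (String × Int)) :
    ∀ x z, Pre_calculate data →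
      calcLoop data (x, z) =
        (x + fsum "forward" data, z + fsum "down" data - fsum "up" data) := by
  induction data with
  | nil => intro x z _; simp [calcLoop, fsum]
  | cons hd tl ih =>
    intro x z hpre
    obtain ⟨d, v⟩ := hd
    have hd' := hpre ⟨d, v⟩ (List.mem_cons_self ..)
    have htl : Pre_calculate tl := fun p hp => hpre p (List.mem_cons_of_mem _ hp)
    simp only at hd'
    rcases hd' with h | h | h <;>
      simp [calcLoop, h, ih _ _ htl, fsum, List.filter] <;> ring

theorem calculate_spec : Claim_equal_calculate := by
  intro data _ hpre
  unfold Spec_calculate calculate calculate_alt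
  have hv : data.any (fun p => !(p.1 == "forward" || p.1 == "down" || p.1 == "up")) = false := by
    simp only [List.any_eq_false]
    intro p hp
    rcases hpre p hp with h | h | h <;> simp [h]
  rw [calcLoop_char data 0 0 hpre, if_neg (by rw [hv]; simp)]
  simp [fsum]
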